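-- pv_equiv track=rewrite | github.com/rong5690001/trae-mem | trae_mem/compress.py | _as_bullets
-- ===== SOURCE A (Python) =====
-- def _as_bullets(lines: list[str], max_chars: int) -> str:
--     out_lines: list[str] = []
--     remaining = max_chars
--     for ln in lines:
--         bullet = f"- {ln}"
--         if len(bullet) + 1 > remaining:
--             break
--         out_lines.append(bullet)
--         remaining -= len(bullet) + 1
--     return "\n".join(out_lines).strip()
-- ===== SOURCE B (Python) =====
-- def _as_bullets(lines: list[str], max_chars: int) -> str:
--     # Prefix-sum table of per-line costs, then binary search for the cutoff,
--     # then a single formatting pass over the kept prefix.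
--     prefix = [0]
--     for ln in lines:
--         prefix.append(prefix[-1] + len(ln) + 3)
--     lo, hi = 0, len(lines)
--     while lo < hi:
--         mid = (lo + hi + 1) // 2
--         if prefix[mid] <= max_chars:
--             lo = mid
--         else:
--             hi = mid - 1
--     return "\n".join("- " + ln for ln in lines[:lo]).strip()
-- ===== Notes on version B (the rewrite author's own statement) =====
-- stated objective: alternative
-- what changed: Replaces A's single interleaved loop (running 'remaining' budget, append + break) with a prefix-sum table of per-line costs, a binary search for the cutoff index, and a separate formatting pass over the kept prefix.
import Mathlib
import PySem

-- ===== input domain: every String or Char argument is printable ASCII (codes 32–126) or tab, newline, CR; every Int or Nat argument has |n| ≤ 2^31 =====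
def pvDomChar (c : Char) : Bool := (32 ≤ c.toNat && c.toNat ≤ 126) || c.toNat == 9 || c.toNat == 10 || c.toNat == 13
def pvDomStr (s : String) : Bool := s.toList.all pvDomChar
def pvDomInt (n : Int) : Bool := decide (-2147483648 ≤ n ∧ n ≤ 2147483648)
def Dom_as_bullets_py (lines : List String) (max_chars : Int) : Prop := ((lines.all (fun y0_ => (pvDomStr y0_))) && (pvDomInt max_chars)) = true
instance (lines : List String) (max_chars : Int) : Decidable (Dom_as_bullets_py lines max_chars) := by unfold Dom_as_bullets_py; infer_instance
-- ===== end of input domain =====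

-- B replaces A's interleaved running-budget loop with a prefix-sum cost table, a
-- binary search for the cutoff, and a separate formatting pass (objective: alternative).

-- ===== PORT A =====
-- the for-loop with break, state (out_lines, remaining)
def asBulletsGoA (lines : List String) (out_lines : List String) (remaining : Int) : List String :=
  match lines with
  | [] => out_lines
  | ln :: rest =>
      let bullet := "- " ++ ln
      if PySem.Str.len bullet + 1 > remaining then out_lines
      else asBulletsGoA rest (out_lines ++ [bullet]) (remaining - (PySem.Str.len bullet + 1))

def as_bullets_py (lines : List String) (max_chars : Int) : String :=
  PySem.Str.strip (PySem.Str.join "\n" (asBulletsGoA lines [] max_chars))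

-- ===== PORT B =====
-- the prefix-table building loop; prefix[-1] is PySem.List.pyGetD pre (-1) (pre is never empty)
def asBulletsPrefix (lines : List String) (pre : List Int) : List Int :=
  match lines with
  | [] => pre
  | ln :: rest =>
      asBulletsPrefix rest (pre ++ [PySem.List.pyGetD pre (-1) 0 + PySem.Str.len ln + 3])

-- the while-loop binary search; lo/hi are nonnegative Python ints, kept as Nat
-- (prefix[mid] is in range whenever the search is called as in as_bullets_py_alt,
--  so List.getD is exact there)
def asBulletsSearch (pre : List Int) (max_chars : Int) (lo hi : Nat) : Nat :=
  if _h : lo < hi then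
    let mid := (lo + hi + 1) / 2
    if pre.getD mid 0 ≤ max_chars then asBulletsSearch pre max_chars mid hi
    else asBulletsSearch pre max_chars lo (mid - 1)
  else lo
termination_by hi - lo
decreasing_by all_goals omega

def as_bullets_py_alt (lines : List String) (max_chars : Int) : String :=
  let pre := asBulletsPrefix lines [0]
  let lo := asBulletsSearch pre max_chars 0 lines.length
  PySem.Str.strip (PySem.Str.join "\n"
    ((PySem.List.slice lines none (some (lo : Int))).map (fun ln => "- " ++ ln)))

-- ===== PRECONDITION & SPEC =====
def Spec_as_bullets_py (lines : List String) (max_chars : Int) (out : String) : Prop := out = as_bullets_py_alt lines max_chars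
instance (lines : List String) (max_chars : Int) (out : String) : Decidable (Spec_as_bullets_py lines max_chars out) := by unfold Spec_as_bullets_py; infer_instance

-- ===== CLAIM (what is proved, stated in full; the proofs are below) =====
def Claim_equal_as_bullets_py : Prop := ∀ (lines : List String) (max_chars : Int), Dom_as_bullets_py lines max_chars → Spec_as_bullets_py lines max_chars (as_bullets_py lines max_chars)

-- ===== LEMMAS AND PROOFS =====

-- cost of a line as a bullet row: len("- " + ln) + 1 = len(ln) + 3
def pvCost (ln : String) : Int := (ln.toList.length : Int) + 3

-- sum of the costs of the first k lines (the value prefix[k] holds)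
def pvP (lines : List String) (k : Nat) : Int := ((lines.take k).map pvCost).sum

-- the number of lines A keeps
def pvCnt (lines : List String) (r : Int) : Nat :=
  match lines with
  | [] => 0
  | ln :: rest => if pvCost ln > r then 0 else pvCnt rest (r - pvCost ln) + 1

theorem pvLenBullet (ln : String) : PySem.Str.len ("- " ++ ln) + 1 = pvCost ln := by
  simp [PySem.Str.len_eq, pvCost]
  omega

theorem pvGoA_eq (lines : List String) : ∀ (out : List String) (r : Int),
    asBulletsGoA lines out r = out ++ (lines.take (pvCnt lines r)).map (fun ln => "- " ++ ln) := by
  induction lines with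
  | nil => intro out r; simp [asBulletsGoA, pvCnt]
  | cons ln rest ih =>
      intro out r
      rw [asBulletsGoA]
      simp only [pvCnt]
      by_cases h : pvCost ln > r
      · rw [if_pos (by rw [pvLenBullet]; exact h), if_pos h]
        simp
      · rw [if_neg (by rw [pvLenBullet]; exact h), if_neg h, ih]
        rw [pvLenBullet]
        simp [List.take_succ_cons]

theorem pvP_zero (lines : List String) : pvP lines 0 = 0 := rfl

theorem pvP_cons (ln : String) (rest : List String) (k : Nat) :
    pvP (ln :: rest) (k + 1) = pvCost ln + pvP rest k := by
  simp [pvP, List.take_succ_cons]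

theorem pvP_succ (lines : List String) (k : Nat) (hk : k < lines.length) :
    pvP lines (k + 1) = pvP lines k + pvCost lines[k] := by
  induction lines generalizing k with
  | nil => simp at hk
  | cons ln rest ih =>
      cases k with
      | zero => simp [pvP]
      | succ k =>
          rw [pvP_cons, ih k (by simpa using hk), pvP_cons]
          simp
          ring

theorem pvCost_pos (ln : String) : 0 < pvCost ln := by
  simp [pvCost]; omega

theorem pvP_lt_aux (lines : List String) : ∀ (k j : Nat), j < k → k ≤ lines.length →
    pvP lines j < pvP lines k := by
  intro k
  induction k with
  | zero => intro j hj _; omega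
  | succ k ih =>
      intro j hj hk
      rw [pvP_succ lines k (by omega)]
      have hc := pvCost_pos lines[k]
      rcases Nat.lt_or_ge j k with h | h
      · have := ih j h (by omega)
        omega
      · have : j = k := by omega
        subst this
        omega

theorem pvP_lt (lines : List String) (j k : Nat) (hj : j < k) (hk : k ≤ lines.length) :
    pvP lines j < pvP lines k := pvP_lt_aux lines k j hj hk

-- the spec both cutoffs satisfy
def pvSpecK (lines : List String) (r : Int) (k : Nat) : Prop :=
  k ≤ lines.length ∧ (k = 0 ∨ pvP lines k ≤ r) ∧ (∀ j, k < j → j ≤ lines.length → r < pvP lines j)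

theorem pvSpecK_unique (lines : List String) (r : Int) (k₁ k₂ : Nat)
    (h₁ : pvSpecK lines r k₁) (h₂ : pvSpecK lines r k₂) : k₁ = k₂ := by
  obtain ⟨hl₁, ha₁, hb₁⟩ := h₁
  obtain ⟨hl₂, ha₂, hb₂⟩ := h₂
  by_contra hne
  rcases Nat.lt_or_ge k₁ k₂ with h | h
  · have h1 := hb₁ k₂ h hl₂
    rcases ha₂ with h0 | hle
    · omega
    · omega
  · have hlt : k₂ < k₁ := by omega
    have h1 := hb₂ k₁ hlt hl₁
    rcases ha₁ with h0 | hle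
    · omega
    · omega

theorem pvCnt_spec (lines : List String) (r : Int) : pvSpecK lines r (pvCnt lines r) := by
  induction lines generalizing r with
  | nil =>
      refine ⟨by simp [pvCnt], Or.inl rfl, ?_⟩
      intro j hj hj2; simp at hj2; omega
  | cons ln rest ih =>
      rw [pvCnt]
      by_cases h : pvCost ln > r
      · rw [if_pos h]
        refine ⟨by simp, Or.inl rfl, ?_⟩
        intro j hj hj2
        have h1 : pvP (ln :: rest) 1 ≤ pvP (ln :: rest) j ∨ 1 = j := by
          rcases Nat.lt_or_ge 1 j with hh | hh
          · exact Or.inl (le_of_lt (pvP_lt _ 1 j hh hj2))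
          · right; omega
        have h2 : pvP (ln :: rest) 1 = pvCost ln := by
          rw [show (1:Nat) = 0 + 1 from rfl, pvP_cons, pvP_zero]; ring
        rcases h1 with h1 | h1
        · omega
        · rw [← h1]; omega
      · rw [if_neg h]
        obtain ⟨hl, ha, hb⟩ := ih (r - pvCost ln)
        refine ⟨by simpa using hl, ?_, ?_⟩
        · right
          rcases ha with h0 | hle
          · rw [h0]
            rw [show (0+1 : Nat) = 1 from rfl, show (1:Nat) = 0 + 1 from rfl, pvP_cons, pvP_zero]
            omega
          · rw [pvP_cons]; omega
        · intro j hj hj2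
          cases j with
          | zero => omega
          | succ j =>
              have := hb j (by omega) (by simpa using hj2)
              rw [pvP_cons]
              omega

-- the built table: asBulletsPrefix lines (acc ++ [c]) appends the running sums after c
def pvTable (lines : List String) (c : Int) : List Int :=
  match lines with
  | [] => []
  | ln :: rest => (c + pvCost ln) :: pvTable rest (c + pvCost ln)

theorem pvLast_pyGetD (acc : List Int) (c : Int) :
    PySem.List.pyGetD (acc ++ [c]) (-1) 0 = c := by
  simp [PySem.List.pyGetD, PySem.List.pyGet?, PySem.List.pyIdx?]

theorem pvPrefix_eq (lines : List String) : ∀ (acc : List Int) (c : Int),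
    asBulletsPrefix lines (acc ++ [c]) = acc ++ [c] ++ pvTable lines c := by
  induction lines with
  | nil => intro acc c; simp [asBulletsPrefix, pvTable]
  | cons ln rest ih =>
      intro acc c
      rw [asBulletsPrefix, pvTable]
      rw [pvLast_pyGetD]
      have hlen : c + PySem.Str.len ln + 3 = c + pvCost ln := by
        simp [PySem.Str.len_eq, pvCost]; ring
      rw [hlen]
      have := ih (acc ++ [c]) (c + pvCost ln)
      simp only [List.append_assoc] at this ⊢
      simpa using this

theorem pvTable_getD (lines : List String) : ∀ (c : Int) (k : Nat), k < lines.length →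
    (pvTable lines c).getD k 0 = c + pvP lines (k + 1) := by
  induction lines with
  | nil => intro c k hk; simp at hk
  | cons ln rest ih =>
      intro c k hk
      cases k with
      | zero =>
          rw [pvTable]
          simp [pvP_cons, pvP_zero]
      | succ k =>
          rw [pvTable]
          simp only [List.getD_cons_succ]
          rw [ih (c + pvCost ln) k (by simpa using hk), pvP_cons]
          ring

theorem pvPre_getD (lines : List String) (k : Nat) (hk : k ≤ lines.length) :
    (asBulletsPrefix lines [0]).getD k 0 = pvP lines k := by
  have h := pvPrefix_eq lines [] 0
  simp only [List.nil_append] at h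
  rw [h]
  cases k with
  | zero => simp [pvP_zero]
  | succ k =>
      simp only [List.cons_append, List.nil_append, List.getD_cons_succ]
      rw [pvTable_getD lines 0 k (by omega)]
      ring

theorem pvSearch_spec (lines : List String) (r : Int) :
    ∀ (d lo hi : Nat), hi - lo ≤ d → lo ≤ hi → hi ≤ lines.length →
    (lo = 0 ∨ pvP lines lo ≤ r) → (∀ j, hi < j → j ≤ lines.length → r < pvP lines j) →
    pvSpecK lines r (asBulletsSearch (asBulletsPrefix lines [0]) r lo hi) := by
  intro d
  induction d with
  | zero =>
      intro lo hi hd hlohi hhi ha hb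
      have : lo = hi := by omega
      subst this
      rw [asBulletsSearch, dif_neg (by omega)]
      exact ⟨by omega, ha, hb⟩
  | succ d ih =>
      intro lo hi hd hlohi hhi ha hb
      rw [asBulletsSearch]
      by_cases h : lo < hi
      · rw [dif_pos h]
        simp only
        set mid := (lo + hi + 1) / 2 with hmid
        have hmlo : lo < mid := by omega
        have hmhi : mid ≤ hi := by omega
        by_cases hc : (asBulletsPrefix lines [0]).getD mid 0 ≤ r
        · rw [if_pos hc]
          rw [pvPre_getD lines mid (by omega)] at hc
          exact ih mid hi (by omega) (by omega) hhi (Or.inr hc) hb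
        · rw [if_neg hc]
          rw [pvPre_getD lines mid (by omega)] at hc
          rw [not_le] at hc
          refine ih lo (mid - 1) (by omega) (by omega) (by omega) ha ?_
          intro j hj hj2
          rcases Nat.lt_or_ge j mid with hh | hh
          · omega
          · rcases Nat.lt_or_ge mid j with hh2 | hh2
            · have := pvP_lt lines mid j hh2 hj2
              omega
            · have hmj : mid = j := by omega
              rw [← hmj]
              omega
      · rw [dif_neg h]
        have : lo = hi := by omega
        subst this
        exact ⟨by omega, ha, hb⟩

theorem pvSearch_eq_cnt (lines : List String) (r : Int) :
    asBulletsSearch (asBulletsPrefix lines [0]) r 0 lines.length = pvCnt lines r := by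
  have hs := pvSearch_spec lines r lines.length 0 lines.length (by omega) (by omega) (le_refl _)
    (Or.inl rfl) (by intro j hj hj2; omega)
  exact pvSpecK_unique lines r _ _ hs (pvCnt_spec lines r)

-- ===== VERDICT (by name: the statement is the Claim_ definition above) =====
theorem as_bullets_py_spec : Claim_equal_as_bullets_py := by
  intro lines max_chars _dom
  unfold Spec_as_bullets_py as_bullets_py as_bullets_py_alt
  simp only
  rw [pvGoA_eq, pvSearch_eq_cnt, PySem.List.slice_to_natCast]
  simp
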